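-- pv_equiv track=rewrite | github.com/tonyyo/- | Python算法指南/108_字模式_巧用split.py | judgeWords
-- ===== SOURCE A (Python) =====
-- def judgeWords(pattern, testStr):
--     listPattern = list(pattern)
--     listTestStr = testStr.split()
--     lenPatter = len(listPattern)
--     lenTestStr = len(listTestStr)
--     if lenPatter != lenTestStr:
--         return False
--     for i in range(1, lenTestStr):
--         if listPattern[i] == listPattern[i -1] and listTestStr[i] != listTestStr[i - 1]:
--             return False
--         if listPattern[i] != listPattern[i - 1] and listTestStr[i] == listTestStr[i - 1]:
--             return False
--     return True
-- ===== SOURCE B (Python) =====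
-- def _runLens(xs):
--     # run-length decomposition: lengths of maximal blocks of equal consecutive elements
--     res = []
--     i = 0
--     n = len(xs)
--     while i < n:
--         j = i + 1
--         while j < n and xs[j] == xs[i]:
--             j += 1
--         res.append(j - i)
--         i = j
--     return res
--
--
-- def judgeWords(pattern, testStr):
--     # Two sequences have identical adjacent-equality structure iff their
--     # run-length decompositions are identical (equal run lengths also force
--     # equal total lengths, so no separate length guard is needed).
--     return _runLens(list(pattern)) == _runLens(testStr.split())
-- ===== Notes on version B (the rewrite author's own statement) =====
-- stated objective: alternative
-- what changed: Replaces A's index loop comparing each adjacent pattern/word pair with a recursive run-length encoder: both sequences are decomposed into lengths of maximal blocks of equal consecutive elements and the two run-length lists are compared, with no length guard and no per-index checks.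
import Mathlib
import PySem

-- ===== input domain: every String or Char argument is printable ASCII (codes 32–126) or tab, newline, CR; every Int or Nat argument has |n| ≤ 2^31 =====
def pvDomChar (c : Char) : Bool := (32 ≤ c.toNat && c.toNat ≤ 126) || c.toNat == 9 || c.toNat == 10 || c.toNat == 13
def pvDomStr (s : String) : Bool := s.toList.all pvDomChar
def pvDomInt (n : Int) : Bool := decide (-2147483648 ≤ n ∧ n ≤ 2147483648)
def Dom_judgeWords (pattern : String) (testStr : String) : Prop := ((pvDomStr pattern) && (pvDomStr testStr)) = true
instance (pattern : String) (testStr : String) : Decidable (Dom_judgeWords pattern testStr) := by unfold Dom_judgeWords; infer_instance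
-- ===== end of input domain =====

-- B compares the run-length decompositions (lengths of maximal blocks of equal consecutive
-- elements) of the pattern and of the word list, instead of A's index loop over adjacent
-- pairs with early returns and a length guard; objective: alternative (same cost).

-- ===== PORT A =====
-- A's for-loop over range(1, lenTestStr) with two early-return branches
def judgeLoopA (p : List Char) (w : List String) : List Int → Bool
  | [] => true
  | i :: rest =>
    if PySem.List.pyGet? p i = PySem.List.pyGet? p (i - 1) ∧
       PySem.List.pyGet? w i ≠ PySem.List.pyGet? w (i - 1) then false
    else if PySem.List.pyGet? p i ≠ PySem.List.pyGet? p (i - 1) ∧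
            PySem.List.pyGet? w i = PySem.List.pyGet? w (i - 1) then false
    else judgeLoopA p w rest

def judgeWords (pattern : String) (testStr : String) : Bool :=
  let listPattern := pattern.toList
  let listTestStr := PySem.Str.split₀ testStr
  let lenPatter := PySem.List.len listPattern
  let lenTestStr := PySem.List.len listTestStr
  if lenPatter ≠ lenTestStr then false
  else judgeLoopA listPattern listTestStr (PySem.List.pyRange 1 lenTestStr 1)

-- ===== PORT B =====
-- Source B's _runLens: the outer while loop walks the suffix xs[i:], the inner while loop
-- measures the run at its head (j - i = 1 + length of the maximal equal prefix of the
-- tail), appends it to res, and advances i to j (= dropping the run from the suffix).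
def runLensAux {α : Type} [DecidableEq α] (res : List Nat) : List α → List Nat
  | [] => res
  | x :: xs =>
      runLensAux (res ++ [1 + (xs.takeWhile (fun y => y = x)).length])
        (xs.dropWhile (fun y => y = x))
termination_by l => l.length
decreasing_by
  exact Nat.lt_succ_of_le (List.length_dropWhile_le _ _)

def judgeWords_alt (pattern : String) (testStr : String) : Bool :=
  decide (runLensAux [] pattern.toList = runLensAux [] (PySem.Str.split₀ testStr))

-- ===== PRECONDITION & SPEC =====
def Spec_judgeWords (pattern : String) (testStr : String) (out : Bool) : Prop := out = judgeWords_alt pattern testStr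
instance (pattern : String) (testStr : String) (out : Bool) : Decidable (Spec_judgeWords pattern testStr out) := by unfold Spec_judgeWords; infer_instance

-- ===== CLAIM (what is proved, stated in full; the proofs are below) =====
def Claim_equal_judgeWords : Prop := ∀ (pattern : String) (testStr : String), Dom_judgeWords pattern testStr → Spec_judgeWords pattern testStr (judgeWords pattern testStr)

-- ===== LEMMAS AND PROOFS =====

-- cons-building version of the run-length decomposition, for the proofs
def runLensCore {α : Type} [DecidableEq α] : List α → List Nat
  | [] => []
  | x :: xs =>
      (1 + (xs.takeWhile (fun y => y = x)).length) ::
        runLensCore (xs.dropWhile (fun y => y = x))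
termination_by l => l.length
decreasing_by
  exact Nat.lt_succ_of_le (List.length_dropWhile_le _ _)

lemma runLensAux_eq {α : Type} [DecidableEq α] (l : List α) :
    ∀ res : List Nat, runLensAux res l = res ++ runLensCore l := by
  induction l using runLensCore.induct with
  | case1 => intro res; simp [runLensAux, runLensCore]
  | case2 x xs ih =>
    intro res
    rw [runLensAux, runLensCore, ih]
    simp

-- adjacent-equality signature of a list
def sigB {α : Type} [DecidableEq α] : List α → List Bool
  | x :: y :: t => decide (y = x) :: sigB (y :: t)
  | _ => []

-- pairwise recursive formulation of the run-length decomposition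
def incHead : List Nat → List Nat
  | [] => []
  | k :: r => (k + 1) :: r

def runLens' {α : Type} [DecidableEq α] : List α → List Nat
  | [] => []
  | [_] => [1]
  | x :: y :: t => if y = x then incHead (runLens' (y :: t)) else 1 :: runLens' (y :: t)

-- reconstruction of run lengths from the adjacency signature
def sigToRuns : List Bool → List Nat
  | [] => [1]
  | true :: t => incHead (sigToRuns t)
  | false :: t => 1 :: sigToRuns t

lemma sigToRuns_ex (s : List Bool) : ∃ k r, sigToRuns s = (k + 1) :: r := by
  induction s with
  | nil => exact ⟨0, [], rfl⟩
  | cons b t ih =>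
    obtain ⟨k, r, h⟩ := ih
    cases b
    · exact ⟨0, sigToRuns t, rfl⟩
    · exact ⟨k + 1, r, by simp [sigToRuns, h, incHead]⟩

lemma runLens'_eq_sigToRuns {α : Type} [DecidableEq α] (x : α) (t : List α) :
    runLens' (x :: t) = sigToRuns (sigB (x :: t)) := by
  induction t generalizing x with
  | nil => rfl
  | cons y t ih =>
    by_cases h : y = x <;> simp [runLens', sigB, h, sigToRuns, ih y]
    rw [ih]

lemma sigToRuns_inj (s s' : List Bool) (h : sigToRuns s = sigToRuns s') : s = s' := by
  induction s generalizing s' with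
  | nil =>
    cases s' with
    | nil => rfl
    | cons b t =>
      obtain ⟨k, r, hk⟩ := sigToRuns_ex t
      cases b <;> simp [sigToRuns, hk, incHead] at h
  | cons b t ih =>
    cases s' with
    | nil =>
      obtain ⟨k, r, hk⟩ := sigToRuns_ex t
      cases b <;> simp [sigToRuns, hk, incHead] at h
    | cons b' t' =>
      obtain ⟨k, r, hk⟩ := sigToRuns_ex t
      obtain ⟨k', r', hk'⟩ := sigToRuns_ex t'
      cases b <;> cases b'
      · simp only [sigToRuns, List.cons.injEq] at h
        simp [ih _ h.2]
      · simp [sigToRuns, hk', incHead] at h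
      · simp [sigToRuns, hk, incHead] at h
      · simp [sigToRuns, hk, hk', incHead] at h ⊢
        refine ih _ ?_
        rw [hk, hk']; simp [h.1, h.2]

lemma sum_runLens' {α : Type} [DecidableEq α] (l : List α) :
    (runLens' l).sum = l.length := by
  induction l using runLens'.induct with
  | case1 => rfl
  | case2 x => rfl
  | case3 y t ih =>
    obtain ⟨k, r, hk⟩ : ∃ k r, runLens' (y :: t) = (k + 1) :: r := by
      rw [runLens'_eq_sigToRuns]; exact sigToRuns_ex _
    rw [hk] at ih; simp at ih
    simp [runLens', hk, incHead]; omega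
  | case4 x y t h ih =>
    simp [runLens', h] at ih ⊢; omega

lemma runLensCore_eq_runLens' {α : Type} [DecidableEq α] (l : List α) :
    runLensCore l = runLens' l := by
  induction l using runLens'.induct with
  | case1 => simp [runLensCore, runLens']
  | case2 x => simp [runLensCore, runLens']
  | case3 y t ih =>
    obtain ⟨k, r, hk⟩ : ∃ k r, runLens' (y :: t) = (k + 1) :: r := by
      rw [runLens'_eq_sigToRuns]; exact sigToRuns_ex _
    rw [hk] at ih
    simp [runLensCore, runLens', List.takeWhile, List.dropWhile, incHead, hk] at ih ⊢
    constructor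
    · omega
    · exact ih.2
  | case4 x y t h ih =>
    simp [runLensCore, runLens', List.takeWhile, List.dropWhile, h, ih]

-- A's early-return loop is True iff the two per-index adjacency checks agree at every index.
lemma judgeLoopA_eq_map (p : List Char) (w : List String) (idxs : List Int) :
    judgeLoopA p w idxs =
      decide (idxs.map (fun i => decide (PySem.List.pyGet? p i = PySem.List.pyGet? p (i - 1))) =
              idxs.map (fun i => decide (PySem.List.pyGet? w i = PySem.List.pyGet? w (i - 1)))) := by
  induction idxs with
  | nil => simp [judgeLoopA]
  | cons i rest ih =>
    by_cases hp : PySem.List.pyGet? p i = PySem.List.pyGet? p (i - 1) <;>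
      by_cases hw : PySem.List.pyGet? w i = PySem.List.pyGet? w (i - 1) <;>
        simp [judgeLoopA, hp, hw, ih]

lemma range_map_eq_sigB {α : Type} [DecidableEq α] (xs : List α) :
    (List.range (xs.length - 1)).map (fun k => decide (xs[k+1]? = xs[k]?)) = sigB xs := by
  induction xs with
  | nil => rfl
  | cons x xs ih =>
    cases xs with
    | nil => rfl
    | cons y t =>
      simp only [List.length_cons, Nat.add_sub_cancel, List.range_succ_eq_map,
        List.map_cons, List.map_map]
      simp only [List.length_cons, Nat.add_sub_cancel] at ih
      rw [show (x :: y :: t)[1]? = some y from rfl, show (x :: y :: t)[0]? = some x from rfl]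
      simp only [sigB]
      rw [← ih]
      congr 1
      simp

lemma map_pyRange_eq_sig {α : Type} [DecidableEq α] (xs : List α) :
    (PySem.List.pyRange 1 (PySem.List.len xs) 1).map
      (fun i => decide (PySem.List.pyGet? xs i = PySem.List.pyGet? xs (i - 1))) = sigB xs := by
  rw [PySem.List.pyRange_one, List.map_map, ← range_map_eq_sigB]
  have hlen : ((PySem.List.len xs : Int) - 1).toNat = xs.length - 1 := by
    simp [PySem.List.len_eq]
  rw [hlen]
  refine List.map_congr_left ?_
  intro k hk
  simp only [Function.comp]
  have hA : PySem.List.pyGet? xs (1 + (k : Int)) = xs[k+1]? := by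
    rw [show (1 : Int) + (k : Int) = ((k + 1 : Nat) : Int) by push_cast; ring,
      PySem.List.pyGet?_natCast]
  simp [hA]

-- same-length sequences have equal signatures iff equal run-length lists
lemma sig_iff_runLens {α β : Type} [DecidableEq α] [DecidableEq β]
    (p : List α) (w : List β) (h : p.length = w.length) :
    (sigB p = sigB w) ↔ (runLensCore p = runLensCore w) := by
  cases p with
  | nil =>
    cases w with
    | nil => simp [sigB, runLensCore]
    | cons y u => simp at h
  | cons x t =>
    cases w with
    | nil => simp at h
    | cons y u =>
      rw [runLensCore_eq_runLens', runLensCore_eq_runLens',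
        runLens'_eq_sigToRuns, runLens'_eq_sigToRuns]
      exact ⟨fun hs => by rw [hs], fun hr => sigToRuns_inj _ _ hr⟩

lemma runLens_ne_of_len_ne {α β : Type} [DecidableEq α] [DecidableEq β]
    (p : List α) (w : List β) (h : p.length ≠ w.length) :
    runLensCore p ≠ runLensCore w := by
  intro he
  apply h
  rw [← sum_runLens' p, ← sum_runLens' w, ← runLensCore_eq_runLens', ← runLensCore_eq_runLens', he]

-- ===== VERDICT (by name: the statement is the Claim_ definition above) =====
theorem judgeWords_spec : Claim_equal_judgeWords := by
  intro pattern testStr _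
  unfold Spec_judgeWords judgeWords judgeWords_alt
  by_cases h : PySem.List.len pattern.toList = PySem.List.len (PySem.Str.split₀ testStr)
  · have hn : pattern.toList.length = (PySem.Str.split₀ testStr).length := by
      simp [PySem.List.len_eq] at h; exact_mod_cast h
    rw [if_neg (not_not_intro h), judgeLoopA_eq_map,
      map_pyRange_eq_sig (PySem.Str.split₀ testStr), ← h,
      map_pyRange_eq_sig pattern.toList]
    rw [runLensAux_eq, runLensAux_eq, List.nil_append, List.nil_append]
    exact decide_eq_decide.mpr (sig_iff_runLens _ _ hn)
  · have hn : pattern.toList.length ≠ (PySem.Str.split₀ testStr).length := by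
      simp [PySem.List.len_eq] at h ⊢; exact_mod_cast h
    rw [if_pos h, eq_comm, decide_eq_false_iff_not, runLensAux_eq, runLensAux_eq,
      List.nil_append, List.nil_append]
    exact runLens_ne_of_len_ne _ _ hn
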